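-- pv_equiv track=rewrite | github.com/aheed/advent-of-code-2023 | src/adv13_2.py | get_patterns
-- ===== SOURCE A (Python) =====
-- def get_patterns(lines: list[str]) -> list[list[str]]:
--     next_pattern_start = 0
--     ret: list[list[str]] = []
--
--     for n in range(len(lines)):
--         if lines[n] == "":
--             ret.append(lines[next_pattern_start:n])
--             next_pattern_start = n+1
--
--     return ret
-- ===== SOURCE B (Python) =====
-- def get_patterns(lines: list[str]) -> list[list[str]]:
--     stops = [i for i, l in enumerate(lines) if l == ""]
--     starts = [0] + [s + 1 for s in stops]
--     return [lines[a:b] for a, b in zip(starts, stops)]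
-- ===== Notes on version B (the rewrite author's own statement) =====
-- stated objective: simpler
-- what changed: Replaces A's fused index loop with mutable cursor state by a loop-free two-pass decomposition: collect blank-line indices, derive the start list, and build the result as slices of zipped (start, stop) pairs (the extra final start is dropped by zip, matching A's trailing-content drop).
import Mathlib
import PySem

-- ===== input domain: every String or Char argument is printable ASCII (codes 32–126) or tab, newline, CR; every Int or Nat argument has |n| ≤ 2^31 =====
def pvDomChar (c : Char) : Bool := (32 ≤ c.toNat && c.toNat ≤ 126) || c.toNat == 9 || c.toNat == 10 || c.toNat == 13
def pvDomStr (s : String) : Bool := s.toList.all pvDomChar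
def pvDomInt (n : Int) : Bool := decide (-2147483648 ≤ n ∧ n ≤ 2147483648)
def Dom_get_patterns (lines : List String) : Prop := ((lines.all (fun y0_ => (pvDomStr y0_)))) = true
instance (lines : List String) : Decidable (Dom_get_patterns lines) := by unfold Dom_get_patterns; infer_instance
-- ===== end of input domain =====

-- B (simpler): replaces A's fused index loop with a loop-free two-pass form — collect blank-line
-- indices, then emit slices of zipped (start, stop) pairs; same cost, same value everywhere.

-- ===== PORT A =====
def get_patterns (lines : List String) : List (List String) :=
  ((PySem.List.pyRange 0 (PySem.List.len lines) 1).foldl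
    (fun (st : Int × List (List String)) n =>
      if PySem.List.pyGetD lines n "" == "" then
        (n + 1, st.2 ++ [PySem.List.slice lines (some st.1) (some n)])
      else st)
    (0, [])).2

-- ===== PORT B =====
def get_patterns_alt (lines : List String) : List (List String) :=
  let stops : List Int := ((PySem.List.enumerate lines).filter (fun p => p.2 == "")).map (·.1)
  let starts : List Int := 0 :: stops.map (· + 1)
  (starts.zip stops).map (fun p => PySem.List.slice lines (some p.1) (some p.2))

-- ===== PRECONDITION & SPEC =====
def Spec_get_patterns (lines : List String) (out : List (List String)) : Prop := out = get_patterns_alt lines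
instance (lines : List String) (out : List (List String)) : Decidable (Spec_get_patterns lines out) := by unfold Spec_get_patterns; infer_instance

-- ===== CLAIM (what is proved, stated in full; the proofs are below) =====
def Claim_equal_get_patterns : Prop := ∀ (lines : List String), Dom_get_patterns lines → Spec_get_patterns lines (get_patterns lines)

-- ===== LEMMAS AND PROOFS =====

-- B's zipped-slices form, characterised as the cursor fold A's filtered loop performs.
theorem fold_eq_zip (lines : List String) (stops : List Int) (s0 : Int)
    (acc : List (List String)) :
    (stops.foldl
      (fun (st : Int × List (List String)) n =>
        (n + 1, st.2 ++ [PySem.List.slice lines (some st.1) (some n)]))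
      (s0, acc)).2
    = acc ++ ((s0 :: stops.map (· + 1)).zip stops).map
        (fun p => PySem.List.slice lines (some p.1) (some p.2)) := by
  induction stops generalizing s0 acc with
  | nil => simp
  | cons a t ih => simp [List.foldl_cons, ih]

-- The blank indices A's loop filters out of range(len) are B's stops list.
theorem filter_range_eq_stops (lines : List String) :
    (PySem.List.pyRange 0 (PySem.List.len lines) 1).filter
      (fun n => PySem.List.pyGetD lines n "" == "")
    = ((PySem.List.enumerate lines).filter (fun p => p.2 == "")).map (·.1) := by
  rw [PySem.List.enumerate_eq_map_pyRange (d := "")]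
  rw [List.filter_map, List.map_map]
  simp only [Function.comp_def, List.map_id_fun', id_eq]

-- ===== VERDICT (by name: the statement is the Claim_ definition above) =====
theorem get_patterns_spec : Claim_equal_get_patterns := by
  intro lines _
  unfold Spec_get_patterns get_patterns get_patterns_alt
  rw [PySem.List.foldl_if_eq_foldl_filter, filter_range_eq_stops, fold_eq_zip]
  simp
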